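-- pv_equiv track=rewrite | github.com/Soumya9348/Doc-generator-and-Chatbot | doc_generator_v2.py | belongs_to_source
-- ===== SOURCE A (Python) =====
-- def belongs_to_source(path: str, source: str) -> bool:
--     """
--     3-tier matching: directory segment → filename prefix → loose substring.
--     Intentionally broad — false positives safer than missed notebooks.
--     """
--     name  = path.split("/")[-1].lower()
--     parts = [p.lower() for p in path.split("/")]
--     s     = source.lower()
--
--     if s in parts[:-1]:
--         return True
--
--     prefixes = [
--         f"landing_etl_{s}", f"raw_etl_{s}", f"euh_etl_{s}", f"curated_etl_{s}",
--         f"{s}_landing", f"{s}_raw", f"{s}_euh", f"{s}_curated",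
--         f"{s}_ingestion", f"{s}_transform", f"{s}_",
--     ]
--     if any(name.startswith(p) or name == p for p in prefixes):
--         return True
--
--     if s in name:
--         return True
--
--     return False
-- ===== SOURCE B (Python) =====
-- def belongs_to_source(path: str, source: str) -> bool:
--     # Single short-circuiting recursive pass over the path segments,
--     # lowercasing lazily: an inner (non-last) segment must equal the
--     # source name; the final segment (the filename) only needs to contain
--     # it.  A's 11-pattern prefix tier is dropped: every prefix contains
--     # the source name, so a prefix hit always implies the substring hit.
--     s = source.lower()
--     def scan(segs):
--         head, *rest = segs
--         if not rest:
--             return s in head.lower()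
--         return head.lower() == s or scan(rest)
--     return scan(path.split("/"))
-- ===== Notes on version B (the rewrite author's own statement) =====
-- stated objective: simpler
-- what changed: B replaces A's three staged passes (build a lowered segment list, slice it, test 11 filename prefixes, then a substring test) by one short-circuiting recursive scan over the raw segments that lowercases each segment lazily and applies equality to inner segments and a single substring test to the last; the prefix tier is dropped since every prefix contains the source name, so it is subsumed by the substring test.
import Mathlib
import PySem

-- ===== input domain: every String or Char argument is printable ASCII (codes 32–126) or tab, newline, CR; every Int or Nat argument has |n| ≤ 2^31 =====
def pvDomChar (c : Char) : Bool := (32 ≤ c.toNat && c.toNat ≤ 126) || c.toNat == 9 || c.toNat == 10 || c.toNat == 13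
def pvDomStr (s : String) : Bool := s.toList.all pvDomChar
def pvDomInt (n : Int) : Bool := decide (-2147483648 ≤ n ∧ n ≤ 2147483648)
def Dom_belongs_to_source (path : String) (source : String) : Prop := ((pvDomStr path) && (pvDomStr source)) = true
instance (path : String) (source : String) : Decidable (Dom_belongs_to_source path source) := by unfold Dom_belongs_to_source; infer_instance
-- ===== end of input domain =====

-- B: one lazy short-circuiting recursive scan over the segments instead of A's staged
-- passes; A's prefix tier is subsumed by the substring test. Objective: simpler.

-- ===== PORT A =====
def belongs_to_source (path : String) (source : String) : Bool :=
  let segs : List (List Char) := PySem.Chars.splitOn path.toList ['/']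
  let name : List Char := PySem.Chars.lower (PySem.List.pyGetD segs (-1) [])
  let parts : List (List Char) := segs.map PySem.Chars.lower
  let s : List Char := PySem.Chars.lower source.toList
  if (PySem.List.slice parts none (some (-1))).contains s then true
  else
    let prefixes : List (List Char) :=
      [ "landing_etl_".toList ++ s, "raw_etl_".toList ++ s, "euh_etl_".toList ++ s,
        "curated_etl_".toList ++ s,
        s ++ "_landing".toList, s ++ "_raw".toList, s ++ "_euh".toList,
        s ++ "_curated".toList, s ++ "_ingestion".toList, s ++ "_transform".toList,
        s ++ "_".toList ]
    if prefixes.any (fun p => PySem.Chars.startswith name p || name == p) then true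
    else if PySem.Chars.isIn s name then true
    else false

-- ===== PORT B =====
-- B's inner 'scan': last segment → substring test; inner segment → equality, else recurse.
-- (Python's 'head, *rest = segs' raises on []; split never yields [], Lean returns false there.)
def scanSegs (s : List Char) : List (List Char) → Bool
  | [] => false
  | [head] => PySem.Chars.isIn s (PySem.Chars.lower head)
  | head :: rest₀ :: rest => (PySem.Chars.lower head == s) || scanSegs s (rest₀ :: rest)

def belongs_to_source_alt (path : String) (source : String) : Bool :=
  scanSegs (PySem.Chars.lower source.toList) (PySem.Chars.splitOn path.toList ['/'])

-- ===== PRECONDITION & SPEC =====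
def Spec_belongs_to_source (path : String) (source : String) (out : Bool) : Prop := out = belongs_to_source_alt path source
instance (path : String) (source : String) (out : Bool) : Decidable (Spec_belongs_to_source path source out) := by unfold Spec_belongs_to_source; infer_instance

-- ===== CLAIM (what is proved, stated in full; the proofs are below) =====
def Claim_equal_belongs_to_source : Prop := ∀ (path : String) (source : String), Dom_belongs_to_source path source → Spec_belongs_to_source path source (belongs_to_source path source)

-- ===== LEMMAS AND PROOFS =====

-- the source string is a substring of each of A's eleven prefixes
lemma s_infix_of_mem (s p : List Char)
    (hp : p ∈ [ "landing_etl_".toList ++ s, "raw_etl_".toList ++ s, "euh_etl_".toList ++ s,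
        "curated_etl_".toList ++ s,
        s ++ "_landing".toList, s ++ "_raw".toList, s ++ "_euh".toList,
        s ++ "_curated".toList, s ++ "_ingestion".toList, s ++ "_transform".toList,
        s ++ "_".toList ]) : s <:+: p := by
  simp only [List.mem_cons, List.not_mem_nil, or_false] at hp
  rcases hp with rfl|rfl|rfl|rfl|rfl|rfl|rfl|rfl|rfl|rfl|rfl
  all_goals first
    | exact (List.suffix_append _ _).isInfix
    | exact (List.prefix_append _ _).isInfix

-- a tier-2 hit implies the tier-3 substring hit
lemma tier3_of_tier2 (s name : List Char)
    (h : ([ "landing_etl_".toList ++ s, "raw_etl_".toList ++ s, "euh_etl_".toList ++ s,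
        "curated_etl_".toList ++ s,
        s ++ "_landing".toList, s ++ "_raw".toList, s ++ "_euh".toList,
        s ++ "_curated".toList, s ++ "_ingestion".toList, s ++ "_transform".toList,
        s ++ "_".toList ].any (fun p => PySem.Chars.startswith name p || name == p)) = true) :
    PySem.Chars.isIn s name = true := by
  rw [List.any_eq_true] at h
  obtain ⟨p, hp, hcond⟩ := h
  have hsp : s <:+: p := s_infix_of_mem s p hp
  rw [Bool.or_eq_true] at hcond
  rw [PySem.Chars.isIn_iff_infix]
  rcases hcond with hsw | heq
  · exact hsp.trans (PySem.Chars.startswith_iff name p |>.mp hsw).isInfix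
  · have : name = p := by simpa using heq
    simpa [this] using hsp

-- B's scan on a nonempty segment list = A's membership-in-init ∨ substring-in-last shape
lemma scanSegs_eq (s : List Char) (segs : List (List Char)) (h : segs ≠ []) :
    scanSegs s segs =
      (((segs.map PySem.Chars.lower).dropLast).contains s
        || PySem.Chars.isIn s (PySem.Chars.lower (PySem.List.pyGetD segs (-1) []))) := by
  induction segs with
  | nil => simp at h
  | cons a rest ih =>
    cases rest with
    | nil => simp [scanSegs, PySem.List.pyGetD_neg_one]
    | cons b rest' =>
      have hne : b :: rest' ≠ [] := by simp
      rw [show scanSegs s (a :: b :: rest') = ((PySem.Chars.lower a == s) || scanSegs s (b :: rest')) from rfl,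
          ih hne]
      have hlast : PySem.List.pyGetD (a :: b :: rest') (-1) ([] : List Char)
          = PySem.List.pyGetD (b :: rest') (-1) ([] : List Char) := by
        simp [PySem.List.pyGetD_neg_one, List.getLast_cons]
      rw [hlast]
      have hdl : ((a :: b :: rest').map PySem.Chars.lower).dropLast
          = PySem.Chars.lower a :: ((b :: rest').map PySem.Chars.lower).dropLast := by
        simp [List.dropLast_cons_of_ne_nil]
      rw [hdl]
      have hbeq : (PySem.Chars.lower a == s) = decide (s = PySem.Chars.lower a) := by
        by_cases hsa : s = PySem.Chars.lower a
        · subst hsa; simp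
        · have hsa' : PySem.Chars.lower a ≠ s := fun h => hsa h.symm
          simp [hsa, hsa']
      simp [Bool.or_assoc, hbeq]

-- splitOn's worker always ends by reversing a cons, so it never yields []
lemma splitOn_go_ne_nil (sep : List Char) (fuel : Nat) : ∀ (l cur : List Char) (acc : List (List Char)),
    PySem.Chars.splitOn.go sep fuel l cur acc ≠ [] := by
  induction fuel with
  | zero => intro l cur acc; simp [PySem.Chars.splitOn.go]
  | succ n ih =>
    intro l cur acc
    cases l with
    | nil => simp [PySem.Chars.splitOn.go]
    | cons c rest =>
      simp only [PySem.Chars.splitOn.go]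
      split
      · exact ih _ _ _
      · exact ih _ _ _

-- split never yields the empty list
lemma splitOn_ne_nil (xs sep : List Char) : PySem.Chars.splitOn xs sep ≠ [] := by
  unfold PySem.Chars.splitOn
  exact splitOn_go_ne_nil sep _ _ _ _

-- ===== VERDICT (by name: the statement is the Claim_ definition above) =====
theorem belongs_to_source_spec : Claim_equal_belongs_to_source := by
  intro path source _
  unfold Spec_belongs_to_source belongs_to_source belongs_to_source_alt
  dsimp only
  set segs := PySem.Chars.splitOn path.toList ['/'] with hsegs
  set s := PySem.Chars.lower source.toList with hs
  set name := PySem.Chars.lower (PySem.List.pyGetD segs (-1) []) with hname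
  rw [scanSegs_eq s segs (splitOn_ne_nil _ _), PySem.List.slice_to_neg_one]
  cases hc1 : ((segs.map PySem.Chars.lower).dropLast).contains s
  · simp only [Bool.false_or, if_neg Bool.false_ne_true]
    cases ht2 : ([ "landing_etl_".toList ++ s, "raw_etl_".toList ++ s, "euh_etl_".toList ++ s,
        "curated_etl_".toList ++ s,
        s ++ "_landing".toList, s ++ "_raw".toList, s ++ "_euh".toList,
        s ++ "_curated".toList, s ++ "_ingestion".toList, s ++ "_transform".toList,
        s ++ "_".toList ].any (fun p => PySem.Chars.startswith name p || name == p))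
    · simp [hname]
    · rw [← hname]
      simp [tier3_of_tier2 s name ht2]
  · simp
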